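-- pv_equiv track=rewrite | github.com/namikazi25/LVLM | mmfakebench/modules/synthesizer.py | _calculate_evidence_stats
-- ===== SOURCE A (Python) =====
-- from typing import Dict, Any, List, Optional, Union
--
-- def _calculate_evidence_stats(evidence: Dict[str, Any]) -> Dict[str, int]:
--     """Calculate statistics about the evidence.
--
--     Args:
--         evidence: Structured evidence dictionary
--
--     Returns:
--         Evidence statistics
--     """
--     total_points = 0
--     supporting = 0
--     contradicting = 0
--     neutral = 0
--
--     # Count Q&A evidence
--     for qa in evidence.get('qa_evidence', []):
--         if 'evidence_tag' in qa:
--             total_points += 1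
--             tag = qa['evidence_tag']
--             if tag in ['supports', 'background']:
--                 supporting += 1
--             elif tag == 'refutes':
--                 contradicting += 1
--             else:
--                 neutral += 1
--
--     # Count web evidence
--     web_evidence_count = len(evidence.get('web_evidence', []))
--     total_points += web_evidence_count
--     neutral += web_evidence_count  # Web evidence is considered neutral until tagged
--
--     return {
--         'total_evidence_points': total_points,
--         'supporting_evidence': supporting,
--         'contradicting_evidence': contradicting,
--         'neutral_evidence': neutral
--     }
-- ===== SOURCE B (Python) =====
-- def _calculate_evidence_stats(evidence):
--     """Calculate statistics about the evidence (staged: extract tags, then count)."""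
--     tags = [qa['evidence_tag'] for qa in evidence.get('qa_evidence', [])
--             if 'evidence_tag' in qa]
--     supporting = tags.count('supports') + tags.count('background')
--     contradicting = tags.count('refutes')
--     web = len(evidence.get('web_evidence', []))
--     return {
--         'total_evidence_points': len(tags) + web,
--         'supporting_evidence': supporting,
--         'contradicting_evidence': contradicting,
--         'neutral_evidence': len(tags) - supporting - contradicting + web,
--     }
-- ===== Notes on version B (the rewrite author's own statement) =====
-- stated objective: simpler
-- what changed: B replaces A's single pass with four running branch-counters by staged passes: first a comprehension extracts the plain list of evidence tags, then supporting/contradicting come from list.count on that list and neutral is derived by subtraction plus the web-evidence length, so no per-item branching or accumulator state remains.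
import Mathlib
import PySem

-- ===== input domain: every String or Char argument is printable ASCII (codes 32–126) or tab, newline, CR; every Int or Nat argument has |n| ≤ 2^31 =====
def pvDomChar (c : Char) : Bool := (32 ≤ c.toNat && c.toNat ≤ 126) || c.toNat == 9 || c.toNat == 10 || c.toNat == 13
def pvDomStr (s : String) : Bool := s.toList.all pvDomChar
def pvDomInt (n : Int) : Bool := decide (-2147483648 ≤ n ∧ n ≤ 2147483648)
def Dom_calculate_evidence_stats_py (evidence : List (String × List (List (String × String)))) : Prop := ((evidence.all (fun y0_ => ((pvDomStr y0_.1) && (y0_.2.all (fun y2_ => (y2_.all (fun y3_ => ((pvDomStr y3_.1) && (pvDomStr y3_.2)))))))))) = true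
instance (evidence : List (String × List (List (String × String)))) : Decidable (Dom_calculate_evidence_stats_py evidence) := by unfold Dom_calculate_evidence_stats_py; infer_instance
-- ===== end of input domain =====

-- ===== PORT A =====
-- B extracts the list of tags first and then counts each category with list.count
-- (neutral by subtraction), replacing A's one pass over four branch-counters; same result.

-- state: (total_points, supporting, contradicting, neutral)
def pvStepA (st : Int × Int × Int × Int) (qa : List (String × String)) : Int × Int × Int × Int :=
  match (PySem.Dict.mk qa).get? "evidence_tag" with
  | none => st
  | some tag =>
    if tag = "supports" ∨ tag = "background" then (st.1 + 1, st.2.1 + 1, st.2.2.1, st.2.2.2)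
    else if tag = "refutes" then (st.1 + 1, st.2.1, st.2.2.1 + 1, st.2.2.2)
    else (st.1 + 1, st.2.1, st.2.2.1, st.2.2.2 + 1)

def calculate_evidence_stats_py (evidence : List (String × List (List (String × String)))) : List (String × Int) :=
  let d := PySem.Dict.mk evidence
  let st := (d.getD "qa_evidence" []).foldl pvStepA (0, 0, 0, 0)
  let web : Int := (d.getD "web_evidence" []).length
  [("total_evidence_points", st.1 + web),
   ("supporting_evidence", st.2.1),
   ("contradicting_evidence", st.2.2.1),
   ("neutral_evidence", st.2.2.2 + web)]

-- ===== PORT B =====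
def calculate_evidence_stats_py_alt (evidence : List (String × List (List (String × String)))) : List (String × Int) :=
  let d := PySem.Dict.mk evidence
  let tags := (d.getD "qa_evidence" []).filterMap
      (fun qa => (PySem.Dict.mk qa).get? "evidence_tag")
  let supporting : Int := (PySem.List.count tags "supports" : Int) + (PySem.List.count tags "background" : Int)
  let contradicting : Int := (PySem.List.count tags "refutes" : Int)
  let web : Int := (d.getD "web_evidence" []).length
  [("total_evidence_points", (tags.length : Int) + web),
   ("supporting_evidence", supporting),
   ("contradicting_evidence", contradicting),
   ("neutral_evidence", (tags.length : Int) - supporting - contradicting + web)]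

-- ===== PRECONDITION & SPEC =====
def Spec_calculate_evidence_stats_py (evidence : List (String × List (List (String × String)))) (out : List (String × Int)) : Prop := out = calculate_evidence_stats_py_alt evidence
instance (evidence : List (String × List (List (String × String)))) (out : List (String × Int)) : Decidable (Spec_calculate_evidence_stats_py evidence out) := by unfold Spec_calculate_evidence_stats_py; infer_instance

-- ===== CLAIM (what is proved, stated in full; the proofs are below) =====
def Claim_equal_calculate_evidence_stats_py : Prop := ∀ (evidence : List (String × List (List (String × String)))), Dom_calculate_evidence_stats_py evidence → Spec_calculate_evidence_stats_py evidence (calculate_evidence_stats_py evidence)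

-- ===== LEMMAS AND PROOFS =====

-- A's four running counters are determined by the tag list B extracts
theorem pv_loop_eq (qas : List (List (String × String))) (st : Int × Int × Int × Int) :
    qas.foldl pvStepA st
    = (let tags := qas.filterMap (fun qa => (PySem.Dict.mk qa).get? "evidence_tag")
       let s : Int := (tags.count "supports" : Int) + (tags.count "background" : Int)
       let r : Int := (tags.count "refutes" : Int)
       (st.1 + tags.length, st.2.1 + s, st.2.2.1 + r,
        st.2.2.2 + ((tags.length : Int) - s - r))) := by
  induction qas generalizing st with
  | nil => simp
  | cons qa rest ih =>
    simp only [List.foldl_cons, List.filterMap_cons]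
    rcases hget : (PySem.Dict.mk qa).get? "evidence_tag" with _ | t
    · simp only [pvStepA, hget]
      exact ih st
    · simp only [pvStepA, hget]
      rw [ih]
      simp only [List.count_cons, List.length_cons, beq_iff_eq]
      split_ifs <;> simp_all [Prod.ext_iff] <;> omega

-- ===== VERDICT (by name: the statement is the Claim_ definition above) =====
theorem calculate_evidence_stats_py_spec : Claim_equal_calculate_evidence_stats_py := by
  intro evidence _
  unfold Spec_calculate_evidence_stats_py calculate_evidence_stats_py calculate_evidence_stats_py_alt
  simp only [pv_loop_eq, PySem.List.count]
  norm_num
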